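-- pv_equiv track=rewrite | github.com/reevald/moe | moe/migration/manage_migration_rest.py | _parse_sql_row
-- ===== SOURCE A (Python) =====
-- from typing import List, Dict, Any, Optional
--
-- def _parse_sql_row(row: str) -> List[str]:
--     """
--     Parse a single SQL row tuple into values.
--
--     Args:
--         row: Row string (inside parentheses)
--
--     Returns:
--         list: List of values
--     """
--     values = []
--     current = ""
--     in_quote = False
--
--     for char in row + ',':
--         if char == "'" and (not current or current[-1] != '\\'):
--             in_quote = not in_quote
--             current += char
--         elif char == ',' and not in_quote:
--             value = current.strip().strip("'")
--             # Handle escaped quotes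
--             value = value.replace("''", "'")
--             # Handle NULL
--             if value.upper() == 'NULL':
--                 value = None
--             values.append(value)
--             current = ""
--         else:
--             current += char
--
--     return values
-- ===== SOURCE B (Python) =====
-- def _parse_sql_row(row):
--     # Index-based: first compute the positions of the delimiter commas (quote
--     # state decided from the raw previous character), then slice the row at
--     # those positions and normalize each slice.  No segment accumulation.
--     ends = []
--     in_quote = False
--     for i, ch in enumerate(row):
--         if ch == "'" and (i == 0 or row[i - 1] != '\\'):
--             in_quote = not in_quote
--         elif ch == ',' and not in_quote:
--             ends.append(i)
--     if not in_quote: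
--         # an unterminated quoted tail yields no value
--         ends.append(len(row))
--     out = []
--     start = 0
--     for e in ends:
--         v = row[start:e].strip().strip("'").replace("''", "'")
--         out.append(None if v.upper() == 'NULL' else v)
--         start = e + 1
--     return out
-- ===== Notes on version B (the rewrite author's own statement) =====
-- stated objective: alternative
-- what changed: Replaced A's accumulator state machine (build each segment char by char, flush and normalize at each unquoted comma, escape test on the accumulator's last char) with an index-based method: one scan records only the positions of delimiter commas (quote state decided from the raw previous character row[i-1]), then the row is sliced at those positions and each slice normalized.
import Mathlib
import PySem

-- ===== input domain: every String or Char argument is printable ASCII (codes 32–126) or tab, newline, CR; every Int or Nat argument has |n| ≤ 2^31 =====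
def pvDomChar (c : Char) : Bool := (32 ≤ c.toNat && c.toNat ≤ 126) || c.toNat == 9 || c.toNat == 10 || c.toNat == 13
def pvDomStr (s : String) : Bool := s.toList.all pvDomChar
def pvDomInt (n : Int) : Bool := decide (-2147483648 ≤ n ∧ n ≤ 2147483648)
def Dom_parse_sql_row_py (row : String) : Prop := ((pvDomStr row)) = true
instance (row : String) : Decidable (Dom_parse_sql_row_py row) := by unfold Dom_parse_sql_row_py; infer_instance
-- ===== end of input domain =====

-- B replaces A's segment-accumulator state machine with an index-based pass (delimiter-comma
-- positions, then slicing); a genuinely different decomposition of the same parsing task.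

-- ===== PORT A =====
-- A: single loop over row+',' accumulating `current`; at each unquoted comma the accumulated
-- segment is stripped/unescaped (NULL → none) and emitted; escape test reads current[-1].
def pvALoop : List Char → List Char → Bool → List (Option String)
  | [], _current, _inq => []
  | c :: rest, current, inq =>
    if c = '\'' ∧ (current = [] ∨ current.getLast? ≠ some '\\') then
      pvALoop rest (current ++ [c]) (!inq)
    else if c = ',' ∧ inq = false then
      (let value := PySem.Chars.replace (PySem.Chars.stripChars (PySem.Chars.strip current) ['\'']) ['\'', '\''] ['\''];
       if PySem.Chars.upper value = (['N', 'U', 'L', 'L'] : List Char) then none else some (String.ofList value)) :: pvALoop rest [] inq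
    else
      pvALoop rest (current ++ [c]) inq

def parse_sql_row_py (row : String) : List (Option String) :=
  pvALoop (row.toList ++ [',']) [] false

-- ===== PORT B =====
-- pass 1 ('for i, ch in enumerate(row)', carrying the index): record the index of each
-- delimiter comma; quote state toggles when row[i-1] is not a backslash. The base case folds
-- in Source B's post-loop 'if not in_quote: ends.append(len(row))'.
def pvBEnds (row : List Char) : List Char → Nat → Bool → List Nat
  | [], _i, inq => if inq then [] else [row.length]
  | c :: rest, i, inq =>
    if c = '\'' ∧ (i = 0 ∨ PySem.List.pyGet? row ((i : Int) - 1) ≠ some '\\') then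
      pvBEnds row rest (i + 1) (!inq)
    else if c = ',' ∧ inq = false then
      i :: pvBEnds row rest (i + 1) inq
    else
      pvBEnds row rest (i + 1) inq

-- normalization of one slice: strip, strip quotes, unescape '', NULL → none
def pvBNorm (seg : List Char) : Option String :=
  let value := PySem.Chars.replace (PySem.Chars.stripChars (PySem.Chars.strip seg) ['\'']) ['\'', '\''] ['\'']
  if PySem.Chars.upper value = (['N', 'U', 'L', 'L'] : List Char) then none else some (String.ofList value)

-- pass 2: row[start:e] for 0 ≤ start ≤ e is exactly (row.drop start).take (e - start)
def pvBEmit (row : List Char) : List Nat → Nat → List (Option String)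
  | [], _start => []
  | e :: rest, start => pvBNorm ((row.drop start).take (e - start)) :: pvBEmit row rest (e + 1)

def parse_sql_row_py_alt (row : String) : List (Option String) :=
  pvBEmit row.toList (pvBEnds row.toList row.toList 0 false) 0

-- ===== PRECONDITION & SPEC =====
def Spec_parse_sql_row_py (row : String) (out : List (Option String)) : Prop := out = parse_sql_row_py_alt row
instance (row : String) (out : List (Option String)) : Decidable (Spec_parse_sql_row_py row out) := by unfold Spec_parse_sql_row_py; infer_instance

-- ===== CLAIM (what is proved, stated in full; the proofs are below) =====
def Claim_equal_parse_sql_row_py : Prop := ∀ (row : String), Dom_parse_sql_row_py row → Spec_parse_sql_row_py row (parse_sql_row_py row)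

-- ===== LEMMAS AND PROOFS =====

theorem pv_snoc (row : List Char) (start i : Nat) (h1 : start ≤ i) (h2 : i < row.length) :
  ((row.drop start).take (i - start)) ++ [row[i]] = (row.drop start).take (i + 1 - start) := by
  have h3 : i + 1 - start = (i - start) + 1 := by omega
  rw [h3, List.take_add_one, List.getElem?_drop]
  have h4 : start + (i - start) = i := by omega
  rw [h4, List.getElem?_eq_getElem h2]
  simp

theorem pv_last (row : List Char) (start i : Nat) (h1 : start < i) (h2 : i ≤ row.length) :
  ((row.drop start).take (i - start)).getLast? = row[i-1]? := by
  rw [List.getLast?_eq_getElem?]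
  simp only [List.length_take, List.length_drop]
  rw [List.getElem?_take_of_lt (by omega), List.getElem?_drop]
  congr 1; omega

theorem pv_pyGet (row : List Char) (i : Nat) (h : 1 ≤ i) :
  PySem.List.pyGet? row ((i:Int) - 1) = row[i-1]? := by
  have : ((i:Int) - 1) = ((i - 1 : Nat) : Int) := by omega
  rw [this, PySem.List.pyGet?_natCast]


theorem pvA_eq_pvB (row : List Char) :
    ∀ (l : List Char) (i start : Nat) (inq : Bool),
      l = row.drop i → i ≤ row.length → start ≤ i →
      (start = i → (i = 0 ∨ row[i - 1]? = some ',')) →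
      pvALoop (l ++ [',']) ((row.drop start).take (i - start)) inq
        = pvBEmit row (pvBEnds row l i inq) start := by
  intro l
  induction l with
  | nil =>
    intro i start inq hl hi hsi _
    have hieq : i = row.length := by
      have := congrArg List.length hl
      simp [List.length_drop] at this
      omega
    subst hieq
    cases inq with
    | false =>
      simp only [pvALoop, pvBEnds, List.nil_append]
      simp [pvBEmit, pvBNorm]
    | true =>
      simp only [pvALoop, pvBEnds, List.nil_append]
      simp [pvBEmit]
  | cons c rest ih =>
    intro i start inq hl hi hsi hinv
    have hlt : i < row.length := by
      by_contra h
      have hnil : row.drop i = [] := List.drop_eq_nil_of_le (by omega)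
      rw [hnil] at hl
      exact List.cons_ne_nil _ _ hl
    have hdrop := List.drop_eq_getElem_cons hlt
    rw [hdrop] at hl
    have hc : c = row[i] := by injection hl
    have hrest : rest = row.drop (i + 1) := by injection hl
    -- the two escape conditions coincide
    have hcond : ((row.drop start).take (i - start) = [] ∨
          ((row.drop start).take (i - start)).getLast? ≠ some '\\')
        ↔ (i = 0 ∨ PySem.List.pyGet? row ((i : Int) - 1) ≠ some '\\') := by
      rcases Nat.eq_or_lt_of_le hsi with heq | hlt2
      · refine iff_of_true (Or.inl (by rw [heq]; simp)) ?_
        rcases hinv heq with h0 | hcomma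
        · exact Or.inl h0
        · rcases Nat.eq_zero_or_pos i with h0 | h1
          · exact Or.inl h0
          · right
            rw [pv_pyGet row i h1, hcomma]
            simp
      · have hne : (row.drop start).take (i - start) ≠ [] := by
          have hlen : ((row.drop start).take (i - start)).length = i - start := by
            simp [List.length_take, List.length_drop]
            omega
          intro h
          rw [h] at hlen
          simp at hlen
          omega
        rw [pv_pyGet row i (by omega), pv_last row start i hlt2 (le_of_lt hlt)]
        constructor
        · rintro (h | h)
          · exact absurd h hne
          · exact Or.inr h
        · rintro (h | h)
          · omega
          · exact Or.inr h
    have hstep : ∀ inq' : Bool,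
        pvALoop (rest ++ [',']) ((row.drop start).take (i + 1 - start)) inq'
          = pvBEmit row (pvBEnds row rest (i + 1) inq') start :=
      fun inq' => ih (i + 1) start inq' hrest (by omega) (by omega) (fun h => absurd h (by omega))
    simp only [List.cons_append, pvALoop, pvBEnds]
    by_cases hq : c = '\'' ∧ (i = 0 ∨ PySem.List.pyGet? row ((i : Int) - 1) ≠ some '\\')
    · rw [if_pos ⟨hq.1, hcond.mpr hq.2⟩, if_pos hq, hc, pv_snoc row start i hsi hlt]
      exact hstep (!inq)
    · have hq' : ¬ (c = '\'' ∧ ((row.drop start).take (i - start) = [] ∨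
          ((row.drop start).take (i - start)).getLast? ≠ some '\\')) :=
        fun h => hq ⟨h.1, hcond.mp h.2⟩
      rw [if_neg hq', if_neg hq]
      by_cases hcm : c = ',' ∧ inq = false
      · rw [if_pos hcm, if_pos hcm]
        simp only [pvBEmit]
        refine congrArg₂ List.cons (by simp [pvBNorm]) ?_
        have hrowi : row[i + 1 - 1]? = some ',' := by
          rw [show i + 1 - 1 = i by omega, List.getElem?_eq_getElem hlt, ← hc, hcm.1]
        have htail := ih (i + 1) (i + 1) inq hrest (by omega) (le_refl _) (fun _ => Or.inr hrowi)
        simpa using htail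
      · rw [if_neg hcm, if_neg hcm, hc, pv_snoc row start i hsi hlt]
        exact hstep inq

-- ===== VERDICT (by name: the statement is the Claim_ definition above) =====
theorem parse_sql_row_py_spec : Claim_equal_parse_sql_row_py := by
  intro row _
  unfold Spec_parse_sql_row_py parse_sql_row_py parse_sql_row_py_alt
  simpa using pvA_eq_pvB row.toList row.toList 0 0 false rfl (Nat.zero_le _) (Nat.le_refl _)
    (fun _ => Or.inl rfl)
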